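-- pv_equiv track=rewrite | github.com/fasepaIm/Yandex_lyceum | Programms/Python/test_2/Untitled-2_2.py | date_analysis
-- ===== SOURCE A (Python) =====
-- def date_analysis(dates):
--     years = []
--     autumn = ['09', '10', '11']
--     dates = list(filter(lambda x: x.split('-')[1] not in autumn, dates))
--     for i in dates:
--         years.append(i.split('-')[-3])
--     years = max(years)
--     dates = list(filter(lambda x: x.split('-')[-3] == years, dates))
--     month = []
--     for i in dates:
--         month.append(i.split('-')[-2])
--     month = max(month)
--     dates = list(filter(lambda x: x.split('-')[-2] == month, dates))
--     days = []
--     for i in dates: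
--         days.append(i.split('-')[-1])
--     days = max(days)
--     dates = list(filter(lambda x: x.split('-')[-1] == days, dates))
--     return dates[-1]
-- ===== SOURCE B (Python) =====
-- def date_analysis(dates):
--     autumn = ('09', '10', '11')
--     best = None
--     for d in dates:
--         parts = d.split('-')
--         if parts[1] in autumn:
--             continue
--         key = (parts[-3], parts[-2], parts[-1])
--         if best is None or key >= best[0]:
--             best = (key, d)
--     return best[1]
-- ===== Notes on version B (the rewrite author's own statement) =====
-- stated objective: simpler
-- what changed: Replaces A's four staged filter/max passes (plus three intermediate projection lists) with a single left-to-right loop that keeps the best (year,month,day) key seen so far, replacing on >= so ties keep the last occurrence exactly as A's final dates[-1] does.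
-- outside the precondition, e.g. on date_analysis([]): A raises ValueError, B raises TypeError
import Mathlib
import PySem

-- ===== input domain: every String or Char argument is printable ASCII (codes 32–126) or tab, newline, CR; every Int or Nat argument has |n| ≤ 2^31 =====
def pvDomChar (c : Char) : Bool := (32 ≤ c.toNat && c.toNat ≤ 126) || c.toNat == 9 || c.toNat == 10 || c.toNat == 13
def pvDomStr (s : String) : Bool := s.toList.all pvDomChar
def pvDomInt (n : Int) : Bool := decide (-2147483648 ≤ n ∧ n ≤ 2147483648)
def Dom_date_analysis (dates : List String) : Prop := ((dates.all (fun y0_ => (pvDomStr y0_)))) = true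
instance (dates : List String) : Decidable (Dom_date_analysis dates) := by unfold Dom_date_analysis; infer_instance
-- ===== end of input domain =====

-- B replaces A's four staged filter/max passes (and three appended projection lists) by a single
-- left-to-right pass keeping the best (year,month,day) key seen so far; same return value on Pre_.

-- ===== PORT A =====
-- x.split('-')  (sep "-" is never empty, so split? is always some)
def pvSplit (x : String) : List String := (PySem.Str.split? x "-").getD []

def pvAutumn : List String := ["09", "10", "11"]

def date_analysis (dates : List String) : String :=
  let dates1 := dates.filter (fun x => !(pvAutumn.contains (PySem.List.pyGetD (pvSplit x) 1 "")))
  let years := dates1.foldl (fun acc i => acc ++ [PySem.List.pyGetD (pvSplit i) (-3) ""]) ([] : List String)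
  let yearsM := (PySem.List.max? years (fun y => y)).getD ""
  let dates2 := dates1.filter (fun x => PySem.List.pyGetD (pvSplit x) (-3) "" == yearsM)
  let months := dates2.foldl (fun acc i => acc ++ [PySem.List.pyGetD (pvSplit i) (-2) ""]) ([] : List String)
  let monthM := (PySem.List.max? months (fun y => y)).getD ""
  let dates3 := dates2.filter (fun x => PySem.List.pyGetD (pvSplit x) (-2) "" == monthM)
  let days := dates3.foldl (fun acc i => acc ++ [PySem.List.pyGetD (pvSplit i) (-1) ""]) ([] : List String)
  let dayM := (PySem.List.max? days (fun y => y)).getD ""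
  let dates4 := dates3.filter (fun x => PySem.List.pyGetD (pvSplit x) (-1) "" == dayM)
  PySem.List.pyGetD dates4 (-1) ""

-- ===== PORT B =====
-- Python tuple comparison a <= b on a 3-tuple of strings (lexicographic, code points)
def pvKeyLeB (a b : String × String × String) : Bool :=
  decide (a.1 < b.1) ||
    (a.1 == b.1 && (decide (a.2.1 < b.2.1) || (a.2.1 == b.2.1 && decide (a.2.2 ≤ b.2.2))))

-- one iteration of Source B's loop body over the accumulator 'best'
def pvStep (best : Option ((String × String × String) × String)) (d : String) :
    Option ((String × String × String) × String) :=
  let parts := pvSplit d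
  if pvAutumn.contains (PySem.List.pyGetD parts 1 "") then best
  else
    let key := (PySem.List.pyGetD parts (-3) "", PySem.List.pyGetD parts (-2) "",
                PySem.List.pyGetD parts (-1) "")
    match best with
    | none => some (key, d)
    | some b => if pvKeyLeB b.1 key then some (key, d) else some b

def date_analysis_alt (dates : List String) : String :=
  match dates.foldl pvStep none with
  | some b => b.2
  | none => ""      -- Source B raises TypeError here (best is None); excluded by Pre_

-- ===== PRECONDITION & SPEC =====
-- Pre_ excludes exactly the inputs where A raises: a string with fewer than 2 '-'-separated parts
-- (IndexError in the filter), a surviving (non-autumn) string with fewer than 3 parts (IndexError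
-- on [-3]), or no surviving string at all (ValueError from max([])).
def Pre_date_analysis (dates : List String) : Prop :=
  (∀ s ∈ dates, 2 ≤ (pvSplit s).length ∧
      (PySem.List.pyGetD (pvSplit s) 1 "" ∉ pvAutumn → 3 ≤ (pvSplit s).length)) ∧
  (dates.any (fun s => !(pvAutumn.contains (PySem.List.pyGetD (pvSplit s) 1 "")))) = true
instance (dates : List String) : Decidable (Pre_date_analysis dates) := by
  unfold Pre_date_analysis; infer_instance

def pvWitness_date_analysis : List String := ["2021-03-15", "2020-12-31", "2021-03-16"]

def Spec_date_analysis (dates : List String) (out : String) : Prop := out = date_analysis_alt dates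
instance (dates : List String) (out : String) : Decidable (Spec_date_analysis dates out) := by
  unfold Spec_date_analysis; infer_instance

-- ===== CLAIM (what is proved, stated in full; the proofs are below) =====
def Claim_equal_date_analysis : Prop := ∀ (dates : List String), Dom_date_analysis dates → Pre_date_analysis dates → Spec_date_analysis dates (date_analysis dates)

-- ===== LEMMAS AND PROOFS =====

-- the (year, month, day) key both programs compare by
def pvKey (x : String) : String × String × String :=
  (PySem.List.pyGetD (pvSplit x) (-3) "", PySem.List.pyGetD (pvSplit x) (-2) "",
   PySem.List.pyGetD (pvSplit x) (-1) "")

def pvNonAut (x : String) : Bool := !(pvAutumn.contains (PySem.List.pyGetD (pvSplit x) 1 ""))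

def pvMaxK (k : String × String × String) (c : List String) : String × String × String :=
  c.foldl (fun a x => if pvKeyLeB a (pvKey x) then pvKey x else a) k

theorem pvKeyLeB_iff (a b : String × String × String) : pvKeyLeB a b = true ↔
    (a.1 < b.1 ∨ (a.1 = b.1 ∧ (a.2.1 < b.2.1 ∨ (a.2.1 = b.2.1 ∧ a.2.2 ≤ b.2.2)))) := by
  simp [pvKeyLeB]

theorem pvKeyLeB_refl (a : String × String × String) : pvKeyLeB a a = true := by
  simp [pvKeyLeB_iff]

theorem pvKeyLeB_total (a b : String × String × String) :
    pvKeyLeB a b = true ∨ pvKeyLeB b a = true := by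
  simp only [pvKeyLeB_iff]
  rcases lt_trichotomy a.1 b.1 with h|h|h
  · exact Or.inl (Or.inl h)
  · rcases lt_trichotomy a.2.1 b.2.1 with h2|h2|h2
    · exact Or.inl (Or.inr ⟨h, Or.inl h2⟩)
    · rcases le_total a.2.2 b.2.2 with h3|h3
      · exact Or.inl (Or.inr ⟨h, Or.inr ⟨h2, h3⟩⟩)
      · exact Or.inr (Or.inr ⟨h.symm, Or.inr ⟨h2.symm, h3⟩⟩)
    · exact Or.inr (Or.inr ⟨h.symm, Or.inl h2⟩)
  · exact Or.inr (Or.inl h)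

theorem pvKeyLeB_antisymm {a b : String × String × String}
    (h1 : pvKeyLeB a b = true) (h2 : pvKeyLeB b a = true) : a = b := by
  rw [pvKeyLeB_iff] at h1 h2
  rcases a with ⟨a1, a2, a3⟩; rcases b with ⟨b1, b2, b3⟩
  simp only at h1 h2
  rcases h1 with h1|⟨e1, h1⟩
  · rcases h2 with h2|⟨e2, _⟩
    · exact absurd h1 (not_lt_of_gt h2)
    · exact absurd h1 (by simp [e2])
  · rcases h2 with h2|⟨e2, h2⟩
    · exact absurd h2 (by simp [e1])
    · subst e1
      rcases h1 with h1|⟨f1, h1⟩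
      · rcases h2 with h2|⟨f2, _⟩
        · exact absurd h1 (not_lt_of_gt h2)
        · exact absurd h1 (by simp [f2])
      · rcases h2 with h2|⟨f2, h2⟩
        · exact absurd h2 (by simp [f1])
        · subst f1; simp [le_antisymm h1 h2]

theorem pvKeyLeB_trans {a b c : String × String × String}
    (h1 : pvKeyLeB a b = true) (h2 : pvKeyLeB b c = true) : pvKeyLeB a c = true := by
  rw [pvKeyLeB_iff] at h1 h2 ⊢
  rcases h1 with h1|⟨e1, h1⟩
  · rcases h2 with h2|⟨e2, _⟩
    · exact Or.inl (h1.trans h2)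
    · exact Or.inl (e2 ▸ h1)
  · rcases h2 with h2|⟨e2, h2⟩
    · exact Or.inl (e1 ▸ h2)
    · refine Or.inr ⟨e1.trans e2, ?_⟩
      rcases h1 with h1|⟨f1, h1⟩
      · rcases h2 with h2|⟨f2, _⟩
        · exact Or.inl (h1.trans h2)
        · exact Or.inl (f2 ▸ h1)
      · rcases h2 with h2|⟨f2, h2⟩
        · exact Or.inl (f1 ▸ h2)
        · exact Or.inr ⟨f1.trans f2, h1.trans h2⟩

theorem pvKeyLeB_of_not {a b : String × String × String} (h : ¬ pvKeyLeB a b = true) :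
    pvKeyLeB b a = true := (pvKeyLeB_total a b).resolve_left h

theorem pvMaxK_cons (k : String × String × String) (x : String) (t : List String) :
    pvMaxK k (x :: t) = pvMaxK (if pvKeyLeB k (pvKey x) then pvKey x else k) t := by
  simp [pvMaxK, List.foldl_cons]

theorem pvMaxK_ub (c : List String) (k : String × String × String) :
    pvKeyLeB k (pvMaxK k c) = true ∧ ∀ x ∈ c, pvKeyLeB (pvKey x) (pvMaxK k c) = true := by
  induction c generalizing k with
  | nil => exact ⟨pvKeyLeB_refl k, by simp⟩
  | cons x t ih =>
    have step : pvKeyLeB k (if pvKeyLeB k (pvKey x) then pvKey x else k) = true := by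
      split_ifs with h
      · exact h
      · exact pvKeyLeB_refl k
    have stepx : pvKeyLeB (pvKey x) (if pvKeyLeB k (pvKey x) then pvKey x else k) = true := by
      split_ifs with h
      · exact pvKeyLeB_refl _
      · exact pvKeyLeB_of_not h
    obtain ⟨ih1, ih2⟩ := ih (if pvKeyLeB k (pvKey x) then pvKey x else k)
    refine ⟨pvMaxK_cons k x t ▸ pvKeyLeB_trans step ih1, ?_⟩
    intro y hy
    rcases List.mem_cons.mp hy with rfl|hy
    · exact pvMaxK_cons k y t ▸ pvKeyLeB_trans stepx ih1
    · exact pvMaxK_cons k x t ▸ ih2 y hy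

theorem pvMaxK_mem (c : List String) (k : String × String × String) :
    pvMaxK k c = k ∨ ∃ x ∈ c, pvKey x = pvMaxK k c := by
  induction c generalizing k with
  | nil => exact Or.inl rfl
  | cons x t ih =>
    rcases ih (if pvKeyLeB k (pvKey x) then pvKey x else k) with h|⟨y, hy, hyk⟩
    · rw [pvMaxK_cons, h]
      split_ifs with hc
      · exact Or.inr ⟨x, List.mem_cons_self, rfl⟩
      · exact Or.inl rfl
    · exact Or.inr ⟨y, List.mem_cons_of_mem _ hy, pvMaxK_cons k x t ▸ hyk⟩

theorem pvStep_nonAut (b : Option ((String × String × String) × String)) (d : String)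
    (hd : pvNonAut d = true) :
    pvStep b d = match b with
      | none => some (pvKey d, d)
      | some b' => if pvKeyLeB b'.1 (pvKey d) then some (pvKey d, d) else some b' := by
  have hc : pvAutumn.contains (PySem.List.pyGetD (pvSplit d) 1 "") = false := by
    simpa [pvNonAut] using hd
  have hc' : PySem.List.pyGetD (pvSplit d) 1 "" ∉ pvAutumn := by simpa using hc
  cases b <;> simp [pvStep, pvKey, hc']

-- characterisation of Source B's loop from a 'some' accumulator
theorem pvFold_some (c : List String) (b : (String × String × String) × String)
    (hc : ∀ x ∈ c, pvNonAut x = true) :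
    c.foldl pvStep (some b) =
      some (pvMaxK b.1 c,
        ((c.filter (fun x => pvKeyLeB (pvMaxK b.1 c) (pvKey x))).getLast?).getD b.2) := by
  induction c generalizing b with
  | nil => simp [pvMaxK]
  | cons x t ih =>
    have hx : pvNonAut x = true := hc x List.mem_cons_self
    have hct : ∀ y ∈ t, pvNonAut y = true := fun y hy => hc y (List.mem_cons_of_mem _ hy)
    set b' : (String × String × String) × String :=
      if pvKeyLeB b.1 (pvKey x) then (pvKey x, x) else b with hb'
    have hstep : pvStep (some b) x = some b' := by
      rw [pvStep_nonAut _ _ hx]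
      by_cases h : pvKeyLeB b.1 (pvKey x) = true <;> simp [hb', h]
    have hb'1 : b'.1 = if pvKeyLeB b.1 (pvKey x) then pvKey x else b.1 := by
      by_cases h : pvKeyLeB b.1 (pvKey x) = true <;> simp [hb', h]
    set M := pvMaxK b'.1 t with hM
    have hMcons : pvMaxK b.1 (x :: t) = M := by rw [pvMaxK_cons, ← hb'1]
    have hxleM : pvKeyLeB (pvKey x) M = true := by
      have h1 : pvKeyLeB b'.1 M = true := (pvMaxK_ub t b'.1).1
      by_cases h : pvKeyLeB b.1 (pvKey x) = true
      · exact pvKeyLeB_trans (by rw [hb'1]; simp [h, pvKeyLeB_refl]) h1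
      · exact pvKeyLeB_trans (pvKeyLeB_trans (pvKeyLeB_of_not h) (by rw [hb'1]; simp [h, pvKeyLeB_refl])) h1
    have lhs : (x :: t).foldl pvStep (some b) = t.foldl pvStep (some b') := by
      rw [List.foldl_cons, hstep]
    rw [lhs, ih b' hct, hMcons, ← hM]
    by_cases hPx : pvKeyLeB M (pvKey x) = true
    · -- x survives the filter; then b.1 ≤ key x, so b' = (pvKey x, x)
      have hxM : pvKey x = M := pvKeyLeB_antisymm hxleM hPx
      have hcond : pvKeyLeB b.1 (pvKey x) = true := by
        by_cases h : pvKeyLeB b.1 (pvKey x) = true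
        · exact h
        · exfalso
          have : pvKeyLeB b.1 M = true := by
            have h1 : pvKeyLeB b'.1 M = true := (pvMaxK_ub t b'.1).1
            have : b'.1 = b.1 := by rw [hb'1]; simp [h]
            rwa [this] at h1
          rw [← hxM] at this; exact h this
      have hb'eq : b' = (pvKey x, x) := by rw [hb']; simp [hcond]
      rw [List.filter_cons, if_pos hPx, List.getLast?_cons, hb'eq]
      simp
    · -- x is dropped; if nothing in t attains M then b' = b
      rw [List.filter_cons, if_neg hPx]
      rcases hLast : (t.filter (fun y => pvKeyLeB M (pvKey y))).getLast? with _|l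
      · have hemp : t.filter (fun y => pvKeyLeB M (pvKey y)) = [] :=
          List.getLast?_eq_none_iff.mp hLast
        have hb'b : b' = b := by
          rw [hb']
          split_ifs with h
          · exfalso
            rcases pvMaxK_mem t b'.1 with hm|⟨y, hy, hyk⟩
            · -- M = b'.1 = pvKey x, contradicting hPx
              have : b'.1 = pvKey x := by rw [hb'1]; simp [h]
              rw [← hM] at hm
              exact hPx (by rw [hm, this]; exact pvKeyLeB_refl _)
            · have : y ∈ t.filter (fun y => pvKeyLeB M (pvKey y)) :=
                List.mem_filter.mpr ⟨hy, by rw [← hM] at hyk; rw [hyk]; exact pvKeyLeB_refl _⟩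
              rw [hemp] at this; exact absurd this (List.not_mem_nil)
          · rfl
        rw [hb'b]
      · simp

-- each of A's stages: the appended list is a map, its max bounds and is attained
theorem pvFoldAppend (c : List String) (f : String → String) (acc : List String) :
    c.foldl (fun acc i => acc ++ [f i]) acc = acc ++ c.map f := by
  induction c generalizing acc with
  | nil => simp
  | cons x t ih => simp [List.foldl_cons, ih]

theorem pvStage (c : List String) (f : String → String) (hne : c ≠ []) :
    (∀ x ∈ c, f x ≤ (PySem.List.max? (c.foldl (fun acc i => acc ++ [f i]) ([] : List String))
        (fun y => y)).getD "")
    ∧ ∃ x ∈ c, f x = (PySem.List.max? (c.foldl (fun acc i => acc ++ [f i]) ([] : List String))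
        (fun y => y)).getD "" := by
  rcases c with _|⟨h, t⟩
  · exact absurd rfl hne
  · rw [pvFoldAppend]
    simp only [List.nil_append, List.map_cons, PySem.List.max?_id_cons, Option.getD_some]
    obtain ⟨h1, h2⟩ := PySem.List.le_foldl_max (t.map f) (f h)
    constructor
    · intro x hx
      rcases List.mem_cons.mp hx with rfl|hx
      · exact h1
      · exact h2 _ (List.mem_map_of_mem hx)
    · rcases PySem.List.foldl_max_mem (t.map f) (f h) with hm|hm
      · exact ⟨h, List.mem_cons_self, hm.symm⟩
      · obtain ⟨y, hy, hyk⟩ := List.mem_map.mp hm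
        exact ⟨y, List.mem_cons_of_mem _ hy, hyk⟩

theorem pyGetD_neg_one {α : Type} (l : List α) (d : α) :
    PySem.List.pyGetD l (-1) d = l.getLast?.getD d := by
  simp only [PySem.List.pyGetD, PySem.List.pyGet?, PySem.List.pyIdx?]
  cases l with
  | nil => rfl
  | cons a t =>
    rw [List.getLast?_eq_getElem?]
    simp


def pvG (i : Int) (x : String) : String := PySem.List.pyGetD (pvSplit x) i ""

theorem pvKey_eq (x : String) : pvKey x = (pvG (-3) x, pvG (-2) x, pvG (-1) x) := rfl

theorem pvFoldl_filter_step (dates : List String) :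
    dates.foldl pvStep none = (dates.filter pvNonAut).foldl pvStep none := by
  rw [List.foldl_filter]
  congr 1
  funext acc y
  by_cases h : pvNonAut y = true
  · simp [h]
  · have hc : PySem.List.pyGetD (pvSplit y) 1 "" ∈ pvAutumn := by
      simpa [pvNonAut] using h
    simp [pvStep, hc]

-- ===== VERDICT (by name: the statement is the Claim_ definition above) =====
theorem date_analysis_spec : Claim_equal_date_analysis := by
  intro dates _ hpre
  obtain ⟨hlen, hany⟩ := hpre
  show date_analysis dates = date_analysis_alt dates
  -- the surviving (non-autumn) candidates
  set C := dates.filter pvNonAut with hCdef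
  have hCna : ∀ x ∈ C, pvNonAut x = true := fun x hx => List.of_mem_filter hx
  have hneC : C ≠ [] := by
    obtain ⟨s, hs, hsp⟩ := List.any_eq_true.mp hany
    exact List.ne_nil_of_mem (List.mem_filter.mpr ⟨hs, hsp⟩)
  -- ===== A side: name the staged values =====
  set yv := (PySem.List.max? (C.foldl (fun acc i => acc ++ [pvG (-3) i]) ([] : List String))
      (fun y => y)).getD "" with hyv
  set C2 := C.filter (fun x => pvG (-3) x == yv) with hC2
  set mv := (PySem.List.max? (C2.foldl (fun acc i => acc ++ [pvG (-2) i]) ([] : List String))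
      (fun y => y)).getD "" with hmv
  set C3 := C2.filter (fun x => pvG (-2) x == mv) with hC3
  set dv := (PySem.List.max? (C3.foldl (fun acc i => acc ++ [pvG (-1) i]) ([] : List String))
      (fun y => y)).getD "" with hdv
  set C4 := C3.filter (fun x => pvG (-1) x == dv) with hC4
  have hA : date_analysis dates = PySem.List.pyGetD C4 (-1) "" := rfl
  obtain ⟨hyub, x1, hx1, hx1e⟩ := pvStage C (pvG (-3)) hneC
  have hyub : ∀ x ∈ C, pvG (-3) x ≤ yv := hyub
  have hx1e : pvG (-3) x1 = yv := hx1e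
  have hneC2 : C2 ≠ [] :=
    List.ne_nil_of_mem (List.mem_filter.mpr ⟨hx1, by simp [hx1e]⟩)
  obtain ⟨hmub, x2, hx2, hx2e⟩ := pvStage C2 (pvG (-2)) hneC2
  have hmub : ∀ x ∈ C2, pvG (-2) x ≤ mv := hmub
  have hx2e : pvG (-2) x2 = mv := hx2e
  have hneC3 : C3 ≠ [] :=
    List.ne_nil_of_mem (List.mem_filter.mpr ⟨hx2, by simp [hx2e]⟩)
  obtain ⟨hdub, x3, hx3, hx3e⟩ := pvStage C3 (pvG (-1)) hneC3
  have hdub : ∀ x ∈ C3, pvG (-1) x ≤ dv := hdub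
  have hx3e : pvG (-1) x3 = dv := hx3e
  -- K = (yv, mv, dv) is an upper bound of all keys of C and is attained
  have hKub : ∀ x ∈ C, pvKeyLeB (pvKey x) (yv, mv, dv) = true := by
    intro x hx
    rw [pvKey_eq, pvKeyLeB_iff]
    simp only
    rcases lt_or_eq_of_le (hyub x hx) with h|h
    · exact Or.inl h
    · refine Or.inr ⟨h, ?_⟩
      have hxC2 : x ∈ C2 := List.mem_filter.mpr ⟨hx, by simp [h]⟩
      rcases lt_or_eq_of_le (hmub x hxC2) with h2|h2
      · exact Or.inl h2
      · refine Or.inr ⟨h2, ?_⟩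
        have hxC3 : x ∈ C3 := List.mem_filter.mpr ⟨hxC2, by simp [h2]⟩
        exact hdub x hxC3
  have hx3C2 : x3 ∈ C2 := (List.mem_filter.mp hx3).1
  have hx3C : x3 ∈ C := (List.mem_filter.mp hx3C2).1
  have hKmem : pvKey x3 = (yv, mv, dv) := by
    rw [pvKey_eq]
    have e3 : pvG (-3) x3 = yv := by simpa using (List.mem_filter.mp hx3C2).2
    have e2 : pvG (-2) x3 = mv := by simpa using (List.mem_filter.mp hx3).2
    rw [e3, e2, hx3e]
  -- A's final list is the last-of-filter by "key = (yv, mv, dv)" over C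
  have hfC4 : C4 = C.filter (fun x => pvKeyLeB (yv, mv, dv) (pvKey x)) := by
    rw [hC4, hC3, hC2, List.filter_filter, List.filter_filter]
    refine List.filter_congr ?_
    intro x hx
    rw [Bool.eq_iff_iff]
    simp only [Bool.and_eq_true, beq_iff_eq]
    constructor
    · rintro ⟨⟨h1, h3⟩, h2⟩
      have : pvKey x = (yv, mv, dv) := by rw [pvKey_eq, h1, h2, h3]
      rw [this]; exact pvKeyLeB_refl _
    · intro h
      have : pvKey x = (yv, mv, dv) := pvKeyLeB_antisymm (hKub x hx) h
      rw [pvKey_eq] at this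
      simp only [Prod.mk.injEq] at this
      obtain ⟨eA, eB, eC⟩ := this
      exact ⟨⟨eC, eB⟩, eA⟩
  -- ===== B side =====
  rcases hCeq : C with _|⟨h0, t0⟩
  · exact absurd hCeq hneC
  have hh0na : pvNonAut h0 = true := hCna h0 (hCeq ▸ List.mem_cons_self)
  have ht0na : ∀ x ∈ t0, pvNonAut x = true :=
    fun x hx => hCna x (hCeq ▸ List.mem_cons_of_mem _ hx)
  set M := pvMaxK (pvKey h0) t0 with hMdef
  have hMub : ∀ x ∈ C, pvKeyLeB (pvKey x) M = true := by
    intro x hx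
    rw [hCeq] at hx
    rcases List.mem_cons.mp hx with rfl|hx
    · exact (pvMaxK_ub t0 (pvKey x)).1
    · exact (pvMaxK_ub t0 (pvKey h0)).2 x hx
  have hMmem : ∃ x ∈ C, pvKey x = M := by
    rcases pvMaxK_mem t0 (pvKey h0) with h|⟨x, hx, hxk⟩
    · exact ⟨h0, hCeq ▸ List.mem_cons_self, h.symm⟩
    · exact ⟨x, hCeq ▸ List.mem_cons_of_mem _ hx, hxk⟩
  have hKM : (yv, mv, dv) = M := by
    have h1 : pvKeyLeB (yv, mv, dv) M = true := by rw [← hKmem]; exact hMub x3 hx3C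
    have h2 : pvKeyLeB M (yv, mv, dv) = true := by
      obtain ⟨xm, hxm, hxmk⟩ := hMmem
      rw [← hxmk]; exact hKub xm hxm
    exact pvKeyLeB_antisymm h1 h2
  have hB : date_analysis_alt dates =
      ((t0.filter (fun x => pvKeyLeB M (pvKey x))).getLast?).getD h0 := by
    show (match dates.foldl pvStep none with
          | some b => b.2 | none => "") = _
    rw [pvFoldl_filter_step, ← hCdef, hCeq, List.foldl_cons, pvStep_nonAut none h0 hh0na]
    show (match t0.foldl pvStep (some (pvKey h0, h0)) with
          | some b => b.2 | none => "") = _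
    rw [pvFold_some t0 (pvKey h0, h0) ht0na]
  -- both equal last-of-filter over C
  have hCfilter : ((C.filter (fun x => pvKeyLeB M (pvKey x))).getLast?).getD "" =
      ((t0.filter (fun x => pvKeyLeB M (pvKey x))).getLast?).getD h0 := by
    rw [hCeq, List.filter_cons]
    by_cases hPh : pvKeyLeB M (pvKey h0) = true
    · rw [if_pos hPh, List.getLast?_cons]
      simp
    · rw [if_neg hPh]
      have hne : t0.filter (fun x => pvKeyLeB M (pvKey x)) ≠ [] := by
        obtain ⟨xm, hxm, hxmk⟩ := hMmem
        rw [hCeq] at hxm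
        rcases List.mem_cons.mp hxm with rfl|hxm
        · exact absurd (hxmk ▸ pvKeyLeB_refl M) hPh
        · exact List.ne_nil_of_mem
            (List.mem_filter.mpr ⟨hxm, by rw [hxmk]; exact pvKeyLeB_refl M⟩)
      rcases hL : (t0.filter (fun x => pvKeyLeB M (pvKey x))).getLast? with _|l
      · exact absurd (List.getLast?_eq_none_iff.mp hL) hne
      · simp
  rw [hA, pyGetD_neg_one, hfC4, hKM, hCfilter, hB]
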